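-- pv_equiv track=rewrite | github.com/ho8ae/Coding-TEST | 프로그래머스/2/17683. ［3차］ 방금그곡/［3차］ 방금그곡.py | parse_sheet
-- ===== SOURCE A (Python) =====
-- def parse_sheet(sheet):
--     result = []
--     i = 0
--
--     while i <len(sheet):
--         if i+1 < len(sheet) and sheet[i+1] == '#':
--             result.append(sheet[i:i+2])
--             i+=2
--         else:
--             result.append(sheet[i])
--             i+=1
--     return result
-- ===== SOURCE B (Python) =====
-- import re
--
-- def parse_sheet(sheet):
--     # One regex pass: each token is any single character optionally followed by '#'.
--     return re.findall(r'[\s\S]#?', sheet)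
-- ===== Notes on version B (the rewrite author's own statement) =====
-- stated objective: idiomatic
-- what changed: Replaces the manual index-based while loop with a single regex findall pass (each token: any one character optionally followed by '#').
import Mathlib
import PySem

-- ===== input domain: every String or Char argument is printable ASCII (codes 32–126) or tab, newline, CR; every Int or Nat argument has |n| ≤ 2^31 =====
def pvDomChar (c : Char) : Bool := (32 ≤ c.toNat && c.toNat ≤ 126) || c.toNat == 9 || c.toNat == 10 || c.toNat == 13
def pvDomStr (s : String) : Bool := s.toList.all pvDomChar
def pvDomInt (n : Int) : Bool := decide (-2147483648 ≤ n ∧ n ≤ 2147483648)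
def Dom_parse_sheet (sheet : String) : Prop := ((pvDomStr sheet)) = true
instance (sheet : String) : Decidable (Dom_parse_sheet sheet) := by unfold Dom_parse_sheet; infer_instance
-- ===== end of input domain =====

-- B replaces A's manual index-scanning while loop with a single regex findall pass (idiomatic; same O(n) cost).


-- ===== PORT A =====
-- A's while loop over index i; sheet[i] and sheet[i:i+2] are ported by hand over the
-- character list (exact here: i is always a nonnegative in-range index, so Python
-- indexing never wraps or raises, and the slice is drop/take).
def parse_sheet_go (cs : List Char) (i : Nat) : List String :=
  if _h : i < cs.length then
    if i + 1 < cs.length ∧ cs[i + 1]! = '#' then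
      String.ofList ((cs.drop i).take 2) :: parse_sheet_go cs (i + 2)
    else
      String.ofList [cs[i]!] :: parse_sheet_go cs (i + 1)
  else []
termination_by cs.length - i

def parse_sheet (sheet : String) : List String :=
  parse_sheet_go sheet.toList 0

-- ===== PORT B =====
-- Port of re.findall(r'[\s\S]#?', sheet): the regex engine scans left to right,
-- non-overlapping; each match is one character, greedily extended by a following '#'.
def parse_sheet_alt_go : List Char → List String
  | [] => []
  | c :: d :: rest =>
      if d = '#' then String.ofList [c, '#'] :: parse_sheet_alt_go rest
      else String.ofList [c] :: parse_sheet_alt_go (d :: rest)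
  | [c] => [String.ofList [c]]

def parse_sheet_alt (sheet : String) : List String :=
  parse_sheet_alt_go sheet.toList

-- ===== PRECONDITION & SPEC =====
def Spec_parse_sheet (sheet : String) (out : List String) : Prop := out = parse_sheet_alt sheet
instance (sheet : String) (out : List String) : Decidable (Spec_parse_sheet sheet out) := by unfold Spec_parse_sheet; infer_instance

-- ===== CLAIM (what is proved, stated in full; the proofs are below) =====
def Claim_equal_parse_sheet : Prop := ∀ (sheet : String), Dom_parse_sheet sheet → Spec_parse_sheet sheet (parse_sheet sheet)

-- ===== LEMMAS AND PROOFS =====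
theorem drop_eq_getBang_cons (cs : List Char) (i : Nat) (h : i < cs.length) :
    cs.drop i = cs[i]! :: cs.drop (i+1) := by
  rw [List.drop_eq_getElem_cons h]
  congr 1
  exact (getElem!_pos cs i h).symm

theorem parse_sheet_go_eq (cs : List Char) :
    ∀ (n i : Nat), cs.length - i ≤ n → parse_sheet_go cs i = parse_sheet_alt_go (cs.drop i) := by
  intro n
  induction n with
  | zero =>
      intro i hn
      have h : ¬ i < cs.length := by omega
      rw [parse_sheet_go, dif_neg h, List.drop_eq_nil_of_le (by omega), parse_sheet_alt_go]
  | succ n ih =>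
      intro i hn
      by_cases h : i < cs.length
      · have hd1 := drop_eq_getBang_cons cs i h
        by_cases h2 : i + 1 < cs.length ∧ cs[i + 1]! = '#'
        · obtain ⟨h1, hsharp⟩ := h2
          have hd2 := drop_eq_getBang_cons cs (i+1) h1
          rw [parse_sheet_go, dif_pos h, if_pos ⟨h1, hsharp⟩, hd1, hd2,
              parse_sheet_alt_go, if_pos hsharp, ih (i+2) (by omega)]
          simp [hsharp]
        · rw [parse_sheet_go, dif_pos h, if_neg h2, hd1, ih (i+1) (by omega)]
          cases hrest : cs.drop (i+1) with
          | nil => simp [parse_sheet_alt_go]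
          | cons d rest =>
              have hdne : d ≠ '#' := by
                intro hdeq
                apply h2
                have h1 : i + 1 < cs.length := by
                  by_contra hge
                  rw [List.drop_eq_nil_of_le (by omega)] at hrest
                  exact List.cons_ne_nil d rest hrest.symm
                refine ⟨h1, ?_⟩
                have hd2 := drop_eq_getBang_cons cs (i+1) h1
                rw [hrest] at hd2
                injection hd2 with hh _
                rw [← hh, hdeq]
              rw [parse_sheet_alt_go, if_neg hdne]
      · rw [parse_sheet_go, dif_neg h, List.drop_eq_nil_of_le (by omega), parse_sheet_alt_go]

-- ===== VERDICT (by name: the statement is the Claim_ definition above) =====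
theorem parse_sheet_spec : Claim_equal_parse_sheet := by
  intro sheet _
  unfold Spec_parse_sheet parse_sheet parse_sheet_alt
  simpa using parse_sheet_go_eq sheet.toList sheet.toList.length 0 (by omega)
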